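-- pv_equiv track=rewrite | github.com/xjtu-enre/MicroEvaluator | backend/featureextractor/utils/msfeaturesextractor/semantic_analysis/get_similarity.py | handle_hump
-- ===== SOURCE A (Python) =====
-- def handle_hump(texts):
--     result = []
--     for text in texts:
--         temptext = []
--         for word in text:
--             temptext.extend(split_camel_case(word))
--         result.append(temptext)
--     return result
--
-- def split_camel_case(string):
--     tokens = []
--     token = []
--     for prev, char, next in zip(' ' + string, string, string[1:] + ' '):
--         if is_camel_case_boundary(prev, char, next):
--             if token:
--                 tokens.append(''.join(token))
--             token = [char]
--         else:
--             token.append(char)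
--     if token:
--         tokens.append(''.join(token))
--     return tokens
--
-- def is_camel_case_boundary(prev, char, next):
--     if prev.isdigit():
--         return not char.isdigit()
--     if char.isupper():
--         return next.islower() or prev.isalpha() and not prev.isupper()
--     return char.isdigit()
-- ===== SOURCE B (Python) =====
-- def handle_hump(texts):
--     return [[tok for word in text for tok in split_camel_case(word)] for text in texts]
--
-- def split_camel_case(string):
--     n = len(string)
--     if n == 0:
--         return []
--     starts = [0]
--     for i in range(1, n):
--         nxt = string[i + 1] if i + 1 < n else ' '
--         if is_camel_case_boundary(string[i - 1], string[i], nxt):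
--             starts.append(i)
--     tokens = []
--     for j in range(1, len(starts)):
--         tokens.append(string[starts[j - 1]:starts[j]])
--     tokens.append(string[starts[-1]:])
--     return tokens
--
-- def is_camel_case_boundary(prev, char, next):
--     if prev.isdigit():
--         return not char.isdigit()
--     if char.isupper():
--         return next.islower() or prev.isalpha() and not prev.isupper()
--     return char.isdigit()
-- ===== Notes on version B (the rewrite author's own statement) =====
-- stated objective: alternative
-- what changed: split_camel_case now first collects the list of boundary start indices and then slices the string between consecutive starts, instead of accumulating a per-character token buffer; the nested extend-loops become comprehensions.
import Mathlib
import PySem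

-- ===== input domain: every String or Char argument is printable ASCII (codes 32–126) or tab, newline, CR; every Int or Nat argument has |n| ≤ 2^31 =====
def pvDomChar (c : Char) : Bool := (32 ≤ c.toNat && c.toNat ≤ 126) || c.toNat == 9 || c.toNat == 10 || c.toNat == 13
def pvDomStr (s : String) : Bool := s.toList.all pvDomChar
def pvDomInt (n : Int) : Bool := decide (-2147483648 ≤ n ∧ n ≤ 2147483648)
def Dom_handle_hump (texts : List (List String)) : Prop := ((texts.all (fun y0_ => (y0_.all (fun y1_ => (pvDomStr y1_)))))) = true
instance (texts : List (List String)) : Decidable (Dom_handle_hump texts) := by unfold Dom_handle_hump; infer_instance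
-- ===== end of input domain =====

-- B replaces A's per-character token-buffer accumulation in split_camel_case by a
-- boundary-index-then-slice decomposition (objective: alternative, same cost).

-- ===== PORT A =====
-- shared helper of both Pythons: is_camel_case_boundary
def is_camel_case_boundary (prev char next : Char) : Bool :=
  if PySem.Chars.isdigit prev then !(PySem.Chars.isdigit char)
  else if PySem.Chars.isupper char then
    (PySem.Chars.islower next || (PySem.Chars.isalpha prev && !(PySem.Chars.isupper prev)))
  else PySem.Chars.isdigit char

-- the for-loop over zip(' '+string, string, string[1:]+' ') with state (tokens, token)
def splitA_go : List (Char × Char × Char) → List String → List Char → List String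
  | [], tokens, token => tokens ++ (if token.isEmpty then [] else [String.mk token])
  | (p, c, nx) :: ts, tokens, token =>
    if is_camel_case_boundary p c nx then
      splitA_go ts (tokens ++ (if token.isEmpty then [] else [String.mk token])) [c]
    else
      splitA_go ts tokens (token ++ [c])

def split_camel_case (s : String) : List String :=
  let cs := s.toList
  splitA_go ((' ' :: cs).zip (cs.zip (cs.drop 1 ++ [' ']))) [] []

def handle_hump (texts : List (List String)) : List (List String) :=
  -- result = []; for text: temptext = []; for word: temptext.extend(...); result.append(temptext)
  texts.foldl (fun result text =>
    result ++ [text.foldl (fun temptext word => temptext ++ split_camel_case word) []]) []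

-- ===== PORT B =====
-- boundary test at index i ≥ 1 of cs; cs.getD (i+1) ' ' is exactly
-- `string[i+1] if i+1 < n else ' '`, and cs.getD (i-1) ' ' / cs.getD i ' ' are the
-- in-range accesses string[i-1], string[i]
def flagB (cs : List Char) (i : Nat) : Bool :=
  is_camel_case_boundary (cs.getD (i - 1) ' ') (cs.getD i ' ') (cs.getD (i + 1) ' ')

-- slices string between consecutive start indices; for 0 ≤ a ≤ b ≤ n,
-- string[a:b] = (cs.drop a).take (b - a) and string[a:] = cs.drop a (exact)
def sliceGo (cs : List Char) : List Nat → List String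
  | [] => []
  | [a] => [String.mk (cs.drop a)]
  | a :: b :: rest => String.mk ((cs.drop a).take (b - a)) :: sliceGo cs (b :: rest)

def split_camel_case_alt (s : String) : List String :=
  let cs := s.toList
  let n := cs.length
  if n = 0 then []
  else sliceGo cs (0 :: (List.range' 1 (n - 1)).filter (flagB cs))

def handle_hump_alt (texts : List (List String)) : List (List String) :=
  texts.map (fun text => text.flatMap (fun word => split_camel_case_alt word))

-- ===== PRECONDITION & SPEC =====
def Spec_handle_hump (texts : List (List String)) (out : List (List String)) : Prop := out = handle_hump_alt texts
instance (texts : List (List String)) (out : List (List String)) : Decidable (Spec_handle_hump texts out) := by unfold Spec_handle_hump; infer_instance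

-- ===== CLAIM (what is proved, stated in full; the proofs are below) =====
def Claim_equal_handle_hump : Prop := ∀ (texts : List (List String)), Dom_handle_hump texts → Spec_handle_hump texts (handle_hump texts)

-- ===== LEMMAS AND PROOFS =====

-- the triple at position j of the zip3 list A iterates over
theorem trips_drop (cs : List Char) (j : Nat) (hj : j < cs.length) :
    (((' ' :: cs).zip (cs.zip (cs.drop 1 ++ [' ']))).drop j)
      = ((if j = 0 then ' ' else cs.getD (j - 1) ' '), cs.getD j ' ', cs.getD (j + 1) ' ')
        :: (((' ' :: cs).zip (cs.zip (cs.drop 1 ++ [' ']))).drop (j + 1)) := by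
  have hlen : (((' ' :: cs).zip (cs.zip (cs.drop 1 ++ [' ']))).length) = cs.length := by
    rcases cs with _ | ⟨c, cs⟩ <;> simp [List.length_zip]
  rw [List.drop_eq_getElem_cons (by omega)]
  congr 1
  rw [List.getElem_zip, List.getElem_zip]
  refine congrArg₂ _ ?_ (congrArg₂ _ ?_ ?_)
  · rcases j with _ | j
    · simp
    · simp [List.getD, List.getElem?_eq_getElem (by omega : j < cs.length)]
  · simp [List.getD, List.getElem?_eq_getElem hj]
  · by_cases h : j + 1 < cs.length
    · rw [List.getElem_append_left (by simp; omega)]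
      simp [List.getD, List.getElem?_eq_getElem h]
    · have hge : (cs.drop 1).length ≤ j := by simp; omega
      rw [List.getElem_append_right hge]
      have : cs[j + 1]? = none := List.getElem?_eq_none (by omega)
      simp [List.getD, this]

theorem trips_drop_len (cs : List Char) :
    (((' ' :: cs).zip (cs.zip (cs.drop 1 ++ [' ']))).drop cs.length) = [] := by
  have hlen : (((' ' :: cs).zip (cs.zip (cs.drop 1 ++ [' ']))).length) = cs.length := by
    rcases cs with _ | ⟨c, cs⟩ <;> simp [List.length_zip]
  rw [List.drop_eq_nil_iff]
  omega

-- prepending accumulated tokens commutes out of splitA_go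
theorem splitA_go_acc (ts : List (Char × Char × Char)) (tokens : List String) (token : List Char) :
    splitA_go ts tokens token = tokens ++ splitA_go ts [] token := by
  induction ts generalizing tokens token with
  | nil => simp [splitA_go]
  | cons t ts ih =>
    obtain ⟨p, c, nx⟩ := t
    by_cases h : is_camel_case_boundary p c nx
    · simp only [splitA_go, if_pos h]
      rw [ih (tokens ++ _), ih (([] : List String) ++ _)]
      simp
    · simp only [splitA_go, if_neg h]
      exact ih tokens (token ++ [c])

theorem take_drop_nonempty (cs : List Char) (a j : Nat) (ha : a < j) (hj : j ≤ cs.length) :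
    ((cs.drop a).take (j - a)).isEmpty = false := by
  rw [List.isEmpty_eq_false_iff, ← List.length_pos_iff, List.length_take, List.length_drop]
  omega

theorem take_drop_snoc (cs : List Char) (a j : Nat) (ha : a ≤ j) (hj : j < cs.length) :
    (cs.drop a).take (j - a) ++ [cs.getD j ' '] = (cs.drop a).take (j + 1 - a) := by
  have h1 : j + 1 - a = (j - a) + 1 := by omega
  rw [h1, List.take_succ, List.getElem?_drop]
  have h2 : a + (j - a) = j := by omega
  rw [h2, List.getElem?_eq_getElem hj]
  simp [List.getD, List.getElem?_eq_getElem hj]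

theorem take_one_drop (cs : List Char) (j : Nat) (hj : j < cs.length) :
    [cs.getD j ' '] = (cs.drop j).take (j + 1 - j) := by
  have := take_drop_snoc cs j j le_rfl hj
  simpa using this

-- main invariant: from position j with the buffer holding cs[a:j], A's loop
-- produces exactly the slices between the remaining boundary starts
theorem splitA_main (cs : List Char) (k j a : Nat) (hk : cs.length - j ≤ k)
    (ha : a < j) (hj : j ≤ cs.length) :
    splitA_go (((' ' :: cs).zip (cs.zip (cs.drop 1 ++ [' ']))).drop j) []
        ((cs.drop a).take (j - a))
      = sliceGo cs (a :: (List.range' j (cs.length - j)).filter (flagB cs)) := by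
  induction k generalizing j a with
  | zero =>
    have hje : j = cs.length := by omega
    subst hje
    rw [trips_drop_len]
    simp only [splitA_go, take_drop_nonempty cs a _ ha hj, Nat.sub_self, List.range'_zero,
      List.filter_nil, sliceGo]
    rw [List.take_of_length_le (by simp)]
    simp
  | succ k ih =>
    by_cases hje : j = cs.length
    · subst hje
      rw [trips_drop_len]
      simp only [splitA_go, take_drop_nonempty cs a _ ha hj, Nat.sub_self, List.range'_zero,
        List.filter_nil, sliceGo]
      rw [List.take_of_length_le (by simp)]
      simp
    · have hjn : j < cs.length := by omega
      rw [trips_drop cs j hjn, if_neg (by omega : ¬ j = 0)]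
      obtain ⟨m, hm⟩ : ∃ m, cs.length - j = m + 1 := ⟨cs.length - j - 1, by omega⟩
      rw [hm, List.range'_succ]
      have hb_eq : is_camel_case_boundary (cs.getD (j - 1) ' ') (cs.getD j ' ') (cs.getD (j + 1) ' ')
          = flagB cs j := rfl
      have hm' : cs.length - (j + 1) = m := by omega
      by_cases hb : flagB cs j
      · simp only [splitA_go, hb_eq, hb, if_pos, List.filter_cons_of_pos hb, List.nil_append]
        rw [take_drop_nonempty cs a j ha hj, if_neg (by simp)]
        rw [splitA_go_acc, take_one_drop cs j hjn]
        have := ih (j + 1) j (by omega) (by omega) (by omega)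
        rw [hm'] at this
        rw [this, sliceGo]
        simp
      · simp only [splitA_go, hb_eq, hb]
        rw [if_neg (by simp [hb]), take_drop_snoc cs a j ha.le hjn, List.filter_cons_of_neg (by simp [hb])]
        have := ih (j + 1) a (by omega) (by omega) (by omega)
        rw [hm'] at this
        exact this

theorem split_word (s : String) : split_camel_case s = split_camel_case_alt s := by
  unfold split_camel_case split_camel_case_alt
  by_cases h0 : s.toList.length = 0
  · have : s.toList = [] := List.length_eq_zero_iff.mp h0
    simp [this, splitA_go]
  · have hn : 0 < s.toList.length := by omega
    rw [if_neg h0]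
    show splitA_go ((' ' :: s.toList).zip (s.toList.zip (s.toList.drop 1 ++ [' ']))) [] []
        = sliceGo s.toList (0 :: (List.range' 1 (s.toList.length - 1)).filter (flagB s.toList))
    have htr : ((' ' :: s.toList).zip (s.toList.zip (s.toList.drop 1 ++ [' '])))
        = (((' ' :: s.toList).zip (s.toList.zip (s.toList.drop 1 ++ [' ']))).drop 0) := by
      rw [List.drop_zero]
    rw [htr, trips_drop s.toList 0 hn, if_pos rfl]
    have hmain := splitA_main s.toList s.toList.length 1 0 (by omega) (by omega) (by omega)
    have h1 : List.take (1 - 0) (List.drop 0 s.toList) = [s.toList.getD 0 ' '] := by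
      simpa using (take_one_drop s.toList 0 hn).symm
    rw [h1] at hmain
    by_cases hb : is_camel_case_boundary ' ' (s.toList.getD 0 ' ') (s.toList.getD 1 ' ')
    · simp only [splitA_go, if_pos hb, List.isEmpty_nil, if_pos rfl, List.append_nil]
      simpa using hmain
    · simp only [splitA_go, if_neg hb, List.nil_append]
      simpa using hmain

theorem foldl_append_singleton (f : List String → List String) (xs : List (List String))
    (acc : List (List String)) :
    xs.foldl (fun r x => r ++ [f x]) acc = acc ++ xs.map f := by
  induction xs generalizing acc with
  | nil => simp
  | cons x xs ih => simp [ih]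

theorem foldl_extend (g : String → List String) (xs : List String) (acc : List String) :
    xs.foldl (fun r x => r ++ g x) acc = acc ++ xs.flatMap g := by
  induction xs generalizing acc with
  | nil => simp
  | cons x xs ih => simp [ih]

-- ===== VERDICT (by name: the statement is the Claim_ definition above) =====
theorem handle_hump_spec : Claim_equal_handle_hump := by
  intro texts _
  unfold Spec_handle_hump handle_hump handle_hump_alt
  rw [foldl_append_singleton]
  simp only [List.nil_append, split_word]
  refine List.map_congr_left ?_
  intro text _
  rw [foldl_extend]
  simp
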